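-- pv_equiv track=rewrite | github.com/jeongYuri/coding-test-solution | 프로그래머스/unrated/181893. 배열 조각하기/배열 조각하기.py | solution
-- ===== SOURCE A (Python) =====
-- def solution(arr, query):
--     for i in range(len(query)):
--         q = query[i]
--         if i%2==0:
--             arr = arr[:q+1]
--         else:
--             arr = arr[q:]
--     return arr
-- ===== SOURCE B (Python) =====
-- def solution(arr, query):
--     # Track the surviving window [lo, hi) through all queries, slice once at the end.
--     lo, hi = 0, len(arr)
--     left_cut = True
--     for q in query:
--         n = hi - lo
--         s = q + 1 if left_cut else q
--         if s < 0:
--             s += n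
--         if s < 0:
--             s = 0
--         elif s > n:
--             s = n
--         if left_cut:
--             hi = lo + s
--         else:
--             lo = lo + s
--         left_cut = not left_cut
--     return arr[lo:hi]
-- ===== Notes on version B (the rewrite author's own statement) =====
-- stated objective: faster
-- what changed: Instead of materialising a new list slice for every query, B tracks the surviving window [lo, hi) as two integer bounds through all queries (with Python's negative-index and clamping rules applied arithmetically) and slices the array once at the end.
import Mathlib
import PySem

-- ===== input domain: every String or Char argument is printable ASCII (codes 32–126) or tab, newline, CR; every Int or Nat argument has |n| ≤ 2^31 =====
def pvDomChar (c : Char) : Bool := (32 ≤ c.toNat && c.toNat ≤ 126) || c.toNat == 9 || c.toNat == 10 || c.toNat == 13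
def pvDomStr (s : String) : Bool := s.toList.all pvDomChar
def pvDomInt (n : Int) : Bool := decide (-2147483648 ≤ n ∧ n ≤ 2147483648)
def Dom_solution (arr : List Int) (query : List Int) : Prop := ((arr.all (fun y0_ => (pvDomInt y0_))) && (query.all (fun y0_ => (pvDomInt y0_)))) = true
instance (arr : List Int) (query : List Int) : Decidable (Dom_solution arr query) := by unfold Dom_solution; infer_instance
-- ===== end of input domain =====

-- B replaces A's repeated list slicing (one slice per query) by tracking the surviving
-- window [lo, hi) through all queries and slicing once at the end.

-- ===== PORT A =====
-- for i in range(len(query)): q = query[i]; if i%2==0: arr = arr[:q+1] else: arr = arr[q:]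
def solution (arr : List Int) (query : List Int) : List Int :=
  (PySem.List.enumerate query 0).foldl
    (fun a iq =>
      if PySem.Int.mod iq.1 2 = 0 then PySem.List.slice a none (some (iq.2 + 1))
      else PySem.List.slice a (some iq.2) none)
    arr

-- ===== PORT B =====
-- Python's index resolution for one slice bound: add len if negative, clamp to [0, n]
def resolveClamp (n : Nat) (q : Int) : Nat :=
  let s : Int := if q < 0 then q + n else q
  if s < 0 then 0 else min s.toNat n

def altLoop : List Int → Bool → Nat → Nat → Nat × Nat
  | [], _, lo, hi => (lo, hi)
  | q :: qs, leftCut, lo, hi =>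
    let n := hi - lo
    if leftCut then altLoop qs false lo (lo + resolveClamp n (q + 1))
    else altLoop qs true (lo + resolveClamp n q) hi

def solution_alt (arr : List Int) (query : List Int) : List Int :=
  let p := altLoop query true 0 arr.length
  (arr.drop p.1).take (p.2 - p.1)

-- ===== PRECONDITION & SPEC =====
def Spec_solution (arr : List Int) (query : List Int) (out : List Int) : Prop := out = solution_alt arr query
instance (arr : List Int) (query : List Int) (out : List Int) : Decidable (Spec_solution arr query out) := by unfold Spec_solution; infer_instance

-- ===== CLAIM (what is proved, stated in full; the proofs are below) =====
def Claim_equal_solution : Prop := ∀ (arr : List Int) (query : List Int), Dom_solution arr query → Spec_solution arr query (solution arr query)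

-- ===== LEMMAS AND PROOFS =====

theorem resolveClamp_eq_clampIdx (n : Nat) (q : Int) :
    resolveClamp n q = PySem.List.clampIdx n q := by
  unfold resolveClamp PySem.List.clampIdx
  simp only [Nat.min_def]
  split_ifs <;> omega

theorem resolveClamp_le (n : Nat) (q : Int) : resolveClamp n q ≤ n := by
  unfold resolveClamp
  simp only [Nat.min_def]
  split_ifs <;> omega

theorem mod_two_succ (s : Int) :
    (PySem.Int.mod (s + 1) 2 = 0) ↔ ¬ (PySem.Int.mod s 2 = 0) := by
  rw [PySem.Int.mod_eq_emod_of_pos (by norm_num : (0:Int) < 2)]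
  rw [PySem.Int.mod_eq_emod_of_pos (by norm_num : (0:Int) < 2)]
  omega

theorem loop_eq (qs : List Int) (arr : List Int) : ∀ (s : Int) (lo hi : Nat),
    lo ≤ hi → hi ≤ arr.length →
    (PySem.List.enumerate qs s).foldl
      (fun a iq =>
        if PySem.Int.mod iq.1 2 = 0 then PySem.List.slice a none (some (iq.2 + 1))
        else PySem.List.slice a (some iq.2) none)
      ((arr.drop lo).take (hi - lo)) =
    ((arr.drop (altLoop qs (decide (PySem.Int.mod s 2 = 0)) lo hi).1).take
      ((altLoop qs (decide (PySem.Int.mod s 2 = 0)) lo hi).2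
        - (altLoop qs (decide (PySem.Int.mod s 2 = 0)) lo hi).1)) := by
  induction qs with
  | nil => intro s lo hi _ _; simp [PySem.List.enumerate_nil, altLoop]
  | cons q qs ih =>
    intro s lo hi hlohi hlen
    rw [PySem.List.enumerate_cons]
    simp only [List.foldl_cons]
    have hcurlen : ((arr.drop lo).take (hi - lo)).length = hi - lo := by
      simp [List.length_take, List.length_drop]; omega
    by_cases hpar : PySem.Int.mod s 2 = 0
    · -- left cut: arr = arr[:q+1]
      have hle := resolveClamp_le (hi - lo) (q + 1)
      have hstep : PySem.List.slice ((arr.drop lo).take (hi - lo)) none (some (q + 1)) =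
          (arr.drop lo).take ((lo + resolveClamp (hi - lo) (q + 1)) - lo) := by
        unfold PySem.List.slice
        dsimp only
        rw [hcurlen, ← resolveClamp_eq_clampIdx]
        simp only [Nat.sub_zero, List.drop_zero, List.take_take]
        congr 1
        omega
      have hsucc : decide (PySem.Int.mod (s + 1) 2 = 0) = false := by
        simp only [decide_eq_false_iff_not, mod_two_succ, not_not]
        exact hpar
      have hd : decide (PySem.Int.mod s 2 = 0) = true := decide_eq_true hpar
      rw [if_pos hpar, hstep, hd,
          ih (s + 1) lo (lo + resolveClamp (hi - lo) (q + 1)) (by omega) (by omega), hsucc]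
      simp [altLoop]
    · -- right cut: arr = arr[q:]
      have hle := resolveClamp_le (hi - lo) q
      have hstep : PySem.List.slice ((arr.drop lo).take (hi - lo)) (some q) none =
          (arr.drop (lo + resolveClamp (hi - lo) q)).take
            (hi - (lo + resolveClamp (hi - lo) q)) := by
        unfold PySem.List.slice
        dsimp only
        rw [hcurlen, ← resolveClamp_eq_clampIdx, List.drop_take, List.drop_drop, List.take_take]
        congr 1
        omega
      have hsucc : decide (PySem.Int.mod (s + 1) 2 = 0) = true := by
        simp only [decide_eq_true_eq, mod_two_succ]
        exact hpar
      have hd : decide (PySem.Int.mod s 2 = 0) = false := decide_eq_false hpar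
      rw [if_neg hpar, hstep, hd,
          ih (s + 1) (lo + resolveClamp (hi - lo) q) hi (by omega) (by omega), hsucc]
      simp [altLoop]

-- ===== VERDICT (by name: the statement is the Claim_ definition above) =====
theorem solution_spec : Claim_equal_solution := by
  intro arr query _
  unfold Spec_solution solution solution_alt
  have h := loop_eq query arr 0 0 arr.length (Nat.zero_le _) (le_refl _)
  simp only [show decide (PySem.Int.mod 0 2 = 0) = true by decide] at h
  simpa using h
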